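-- pv_equiv track=rewrite | github.com/PlacemeProject/LocalToAWS17-11-24 | job_seekers/models.py | path_by_user_id
-- ===== SOURCE A (Python) =====
-- def path_by_user_id(user_id: int):
--     user_id_int = user_id + 100000000
--     revchar = ''
--     i=1
--     while user_id_int>0:
--         rem = user_id_int%10
--         revchar += chr(rem+48)
--         user_id_int //= 10
--         if (i == 3 or i == 6):
--             revchar += '/'
--         i +=1
--     path = revchar[::-1]
--     return path
-- ===== SOURCE B (Python) =====
-- def path_by_user_id(user_id: int):
--     n = user_id + 100000000
--     if n <= 0:
--         return ''
--     s = str(n)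
--     L = len(s)
--     res = s
--     for pos in (L - 3, L - 6):
--         if pos >= 0:
--             res = res[:pos] + '/' + res[pos:]
--     return res
-- ===== Notes on version B (the rewrite author's own statement) =====
-- stated objective: idiomatic
-- what changed: B converts n to its decimal string once with str() and splices '/' at positions L-3 and L-6 from the left (guarded to be >= 0), instead of A's digit-by-digit reversed construction with a loop counter and a final string reversal.
import Mathlib
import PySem

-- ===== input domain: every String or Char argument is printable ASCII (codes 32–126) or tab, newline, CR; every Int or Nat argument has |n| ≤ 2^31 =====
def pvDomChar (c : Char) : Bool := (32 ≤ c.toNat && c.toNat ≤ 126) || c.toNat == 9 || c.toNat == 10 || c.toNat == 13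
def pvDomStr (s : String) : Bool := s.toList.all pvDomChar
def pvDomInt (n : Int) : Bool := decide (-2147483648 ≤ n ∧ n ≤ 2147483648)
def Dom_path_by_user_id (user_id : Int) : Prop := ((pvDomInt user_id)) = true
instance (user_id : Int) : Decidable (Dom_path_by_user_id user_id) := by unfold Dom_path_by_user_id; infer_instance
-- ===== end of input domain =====

-- B builds the decimal string of user_id + 100000000 once and splices '/' at the two
-- fixed from-the-right positions, instead of A's reversed digit-by-digit loop (idiomatic; same cost).

-- ===== PORT A =====
-- the while loop: state (user_id_int, revchar, i); one iteration appends chr(rem+48) and maybe '/'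
def pathLoopA (user_id_int : Int) (revchar : List Char) (i : Int) : List Char :=
  if 0 < user_id_int then
    let rem := PySem.Int.mod user_id_int 10
    let revchar1 := revchar ++ [Char.ofNat (rem + 48).toNat]   -- revchar += chr(rem+48)
    let revchar2 := if i = 3 ∨ i = 6 then revchar1 ++ ['/'] else revchar1
    pathLoopA (PySem.Int.floordiv user_id_int 10) revchar2 (i + 1)
  else revchar
termination_by user_id_int.toNat
decreasing_by
  rw [PySem.Int.floordiv_eq_ediv_of_pos (by omega : (0:Int) < 10)]
  omega

def path_by_user_id (user_id : Int) : String :=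
  let revchar := pathLoopA (user_id + 100000000) [] 1
  -- path = revchar[::-1] : PySem.List.slice? revchar none none (-1) = some revchar.reverse
  String.ofList revchar.reverse

-- ===== PORT B =====
-- loop body: if pos >= 0: res = res[:pos] + '/' + res[pos:]
def insertSlashAt (res : List Char) (pos : Int) : List Char :=
  if 0 ≤ pos then
    PySem.List.slice res none (some pos) ++ '/' :: PySem.List.slice res (some pos) none
  else res

def path_by_user_id_alt (user_id : Int) : String :=
  let n := user_id + 100000000
  if n ≤ 0 then "" else
    let s := (PySem.Int.toStr n).toList
    let L : Int := s.length
    String.ofList ([L - 3, L - 6].foldl insertSlashAt s)   -- for pos in (L-3, L-6): …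

-- ===== PRECONDITION & SPEC =====
def Spec_path_by_user_id (user_id : Int) (out : String) : Prop := out = path_by_user_id_alt user_id
instance (user_id : Int) (out : String) : Decidable (Spec_path_by_user_id user_id out) := by unfold Spec_path_by_user_id; infer_instance

-- ===== CLAIM (what is proved, stated in full; the proofs are below) =====
def Claim_equal_path_by_user_id : Prop := ∀ (user_id : Int), Dom_path_by_user_id user_id → Spec_path_by_user_id user_id (path_by_user_id user_id)

-- ===== LEMMAS AND PROOFS =====

-- the '/' (if any) that A's loop appends after the digit processed at loop counter i
def slashMark (i : Int) : List Char := if i = 3 ∨ i = 6 then ['/'] else []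

-- pure specification of A's loop output (reversed digits of m interleaved with slashes)
def gspec (m : Nat) (i : Int) : List Char :=
  if h : m = 0 then [] else
    Nat.digitChar (m % 10) :: (slashMark i ++ gspec (m / 10) (i + 1))
termination_by m
decreasing_by exact Nat.div_lt_self (Nat.pos_of_ne_zero h) (by omega)

-- insert '/' at (left) position p if 0 ≤ p
def insAtP (l : List Char) (p : Int) : List Char :=
  if 0 ≤ p then l.take p.toNat ++ '/' :: l.drop p.toNat else l

-- splice slashes into digit string D, for loop counter starting at i:
-- positions L-4+i (fires while i ≤ 3) and L-7+i (fires while i ≤ 6), rightmost first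
def Tmark (D : List Char) (i : Int) : List Char :=
  let L : Int := D.length
  let l1 := if i ≤ 3 then insAtP D (L - 4 + i) else D
  if i ≤ 6 then insAtP l1 (L - 7 + i) else l1

theorem insertSlashAt_eq_insAtP (l : List Char) (p : Int) :
    insertSlashAt l p = insAtP l p := by
  unfold insertSlashAt insAtP
  split_ifs with h
  · rw [PySem.List.slice_to l h, PySem.List.slice_from l h]
  · rfl

theorem charOf_digit (d : Nat) (hd : d < 10) :
    Char.ofNat (((d : Int) + 48).toNat) = Nat.digitChar d := by
  have : ((d : Int) + 48).toNat = d + 48 := by omega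
  rw [this]
  interval_cases d <;> rfl

theorem pathLoopA_eq_gspec (m : Nat) : ∀ (acc : List Char) (i : Int),
    pathLoopA (m : Int) acc i = acc ++ gspec m i := by
  induction m using Nat.strong_induction_on with
  | _ m ih =>
    intro acc i
    rw [pathLoopA, gspec]
    by_cases hm : m = 0
    · simp [hm]
    · have hm' : 0 < (m : Int) := by omega
      rw [if_pos hm', dif_neg hm]
      have hmod : PySem.Int.mod (m : Int) 10 = ((m % 10 : Nat) : Int) := by
        rw [PySem.Int.mod_eq_emod_of_pos (by omega : (0:Int) < 10)]
        push_cast; rfl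
      have hdiv : PySem.Int.floordiv (m : Int) 10 = ((m / 10 : Nat) : Int) := by
        rw [PySem.Int.floordiv_eq_ediv_of_pos (by omega : (0:Int) < 10)]
        push_cast; rfl
      rw [hmod, hdiv, ih (m / 10) (Nat.div_lt_self (Nat.pos_of_ne_zero hm) (by omega)),
        charOf_digit (m % 10) (Nat.mod_lt m (by omega))]
      unfold slashMark
      split_ifs <;> simp_all

theorem length_insAtP_ge (l : List Char) (p : Int) : l.length ≤ (insAtP l p).length := by
  unfold insAtP
  split_ifs
  · simp only [List.length_append, List.length_cons, List.length_take, List.length_drop]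
    omega
  · exact le_rfl

theorem insAtP_append (l1 l2 : List Char) (p : Int) (hp : p ≤ (l1.length : Int)) :
    insAtP (l1 ++ l2) p = insAtP l1 p ++ l2 := by
  unfold insAtP
  split_ifs with h
  · have hle : p.toNat ≤ l1.length := by omega
    rw [List.take_append_of_le_length hle, List.drop_append_of_le_length hle]
    simp
  · rfl

theorem insAtP_length_self (l : List Char) : insAtP l (l.length : Int) = l ++ ['/'] := by
  unfold insAtP
  simp

theorem Tmark_append (D : List Char) (d : Char) (i : Int) (hi : 1 ≤ i) :
    Tmark (D ++ [d]) i = Tmark D (i + 1) ++ slashMark i ++ [d] := by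
  unfold Tmark slashMark
  simp only [List.length_append, List.length_cons, List.length_nil]
  set Lq : Int := (D.length : Int) with hLq
  have hL : ((D.length + 1 : Nat) : Int) = Lq + 1 := by push_cast; rfl
  rw [hL]
  rcases (by omega : i ≤ 2 ∨ i = 3 ∨ (4 ≤ i ∧ i ≤ 5) ∨ i = 6 ∨ 7 ≤ i) with h | h | h | h | h
  · -- i ≤ 2 : both slashes still ahead
    rw [if_pos (by omega : i ≤ 3), if_pos (by omega : i + 1 ≤ 3),
      if_pos (by omega : i ≤ 6), if_pos (by omega : i + 1 ≤ 6)]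
    have e1 : Lq + 1 - 4 + i = Lq - 4 + (i + 1) := by ring
    have e2 : Lq + 1 - 7 + i = Lq - 7 + (i + 1) := by ring
    rw [e1, e2, insAtP_append D [d] (Lq - 4 + (i + 1)) (by omega),
      insAtP_append (insAtP D (Lq - 4 + (i + 1))) [d] (Lq - 7 + (i + 1)) (by
        have := length_insAtP_ge D (Lq - 4 + (i + 1))
        omega),
      if_neg (show ¬ (i = 3 ∨ i = 6) by omega)]
    simp
  · -- i = 3 : first slash fires now, at the end of D
    subst h
    rw [if_pos (by omega : (3:Int) ≤ 3), if_neg (by omega : ¬ (3:Int) + 1 ≤ 3),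
      if_pos (by omega : (3:Int) ≤ 6), if_pos (by omega : (3:Int) + 1 ≤ 6)]
    have e1 : Lq + 1 - 4 + 3 = Lq := by ring
    have e2 : Lq + 1 - 7 + 3 = Lq - 3 := by ring
    have e3 : Lq - 7 + (3 + 1) = Lq - 3 := by ring
    rw [e1, e2, e3, insAtP_append D [d] Lq (by omega), insAtP_length_self,
      insAtP_append (D ++ ['/']) [d] (Lq - 3)
        (by simp only [List.length_append, List.length_cons, List.length_nil]; push_cast; omega),
      insAtP_append D ['/'] (Lq - 3) (by omega),
      if_pos (show (3:Int) = 3 ∨ (3:Int) = 6 by norm_num)]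
  · -- 4 ≤ i ≤ 5 : first slash already placed, second ahead
    rw [if_neg (by omega : ¬ i ≤ 3), if_neg (by omega : ¬ i + 1 ≤ 3),
      if_pos (by omega : i ≤ 6), if_pos (by omega : i + 1 ≤ 6)]
    have e2 : Lq + 1 - 7 + i = Lq - 7 + (i + 1) := by ring
    rw [e2, insAtP_append D [d] (Lq - 7 + (i + 1)) (by omega),
      if_neg (show ¬ (i = 3 ∨ i = 6) by omega)]
    simp
  · -- i = 6 : second slash fires now, at the end of D
    subst h
    rw [if_neg (by omega : ¬ (6:Int) ≤ 3), if_neg (by omega : ¬ (6:Int) + 1 ≤ 3),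
      if_pos (by omega : (6:Int) ≤ 6), if_neg (by omega : ¬ (6:Int) + 1 ≤ 6)]
    have e2 : Lq + 1 - 7 + 6 = Lq := by ring
    rw [e2, insAtP_append D [d] Lq (by omega), insAtP_length_self,
      if_pos (show (6:Int) = 3 ∨ (6:Int) = 6 by norm_num)]
  · -- 7 ≤ i : no slashes any more
    rw [if_neg (by omega : ¬ i ≤ 3), if_neg (by omega : ¬ i + 1 ≤ 3),
      if_neg (by omega : ¬ i ≤ 6), if_neg (by omega : ¬ i + 1 ≤ 6),
      if_neg (show ¬ (i = 3 ∨ i = 6) by omega)]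
    simp

theorem slashMark_reverse (i : Int) : (slashMark i).reverse = slashMark i := by
  unfold slashMark; split_ifs <;> rfl

theorem Tmark_single (d : Char) (i : Int) (hi : 1 ≤ i) :
    Tmark [d] i = slashMark i ++ [d] := by
  unfold Tmark slashMark insAtP
  simp only [List.length_singleton, Nat.cast_one]
  rcases (by omega : i ≤ 2 ∨ i = 3 ∨ (4 ≤ i ∧ i ≤ 5) ∨ i = 6 ∨ 7 ≤ i) with h | h | h | h | h
  · rw [if_pos (by omega : i ≤ 3), if_neg (by omega : ¬ (0:Int) ≤ 1 - 4 + i),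
      if_pos (by omega : i ≤ 6), if_neg (by omega : ¬ (0:Int) ≤ 1 - 7 + i),
      if_neg (show ¬ (i = 3 ∨ i = 6) by omega)]
    simp
  · subst h; norm_num
  · rw [if_neg (by omega : ¬ i ≤ 3), if_pos (by omega : i ≤ 6),
      if_neg (by omega : ¬ (0:Int) ≤ 1 - 7 + i),
      if_neg (show ¬ (i = 3 ∨ i = 6) by omega)]
    simp
  · subst h; norm_num
  · rw [if_neg (by omega : ¬ i ≤ 3), if_neg (by omega : ¬ i ≤ 6),
      if_neg (show ¬ (i = 3 ∨ i = 6) by omega)]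
    simp

theorem gspec_reverse_eq_Tmark (m : Nat) : 0 < m → ∀ (i : Int), 1 ≤ i →
    (gspec m i).reverse = Tmark (Nat.toDigits 10 m) i := by
  induction m using Nat.strong_induction_on with
  | _ m ih =>
    intro hm i hi
    rw [gspec, dif_neg (by omega : ¬ m = 0)]
    by_cases hsmall : m < 10
    · -- single digit: m / 10 = 0, toDigits = [digitChar m]
      have hdiv0 : m / 10 = 0 := Nat.div_eq_of_lt hsmall
      have hmod : m % 10 = m := Nat.mod_eq_of_lt hsmall
      rw [hdiv0, hmod, gspec, dif_pos rfl, Nat.toDigits_of_lt_base hsmall,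
        Tmark_single _ _ hi]
      simp [slashMark_reverse]
    · -- m ≥ 10 : peel the last digit
      have hq : 0 < m / 10 := Nat.div_pos (by omega) (by omega)
      rw [Nat.toDigits_of_base_le (by omega : 1 < 10) (by omega : 10 ≤ m),
        Tmark_append _ _ _ hi, ← ih (m / 10) (Nat.div_lt_self (by omega) (by omega)) hq (i + 1) (by omega)]
      simp [slashMark_reverse]

theorem toList_toStr_pos (n : Int) (hn : 0 < n) :
    (PySem.Int.toStr n).toList = Nat.toDigits 10 n.toNat := by
  unfold PySem.Int.toStr PySem.Int.toChars
  rw [if_neg (by omega : ¬ n < 0), String.toList_ofList]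

-- ===== VERDICT (by name: the statement is the Claim_ definition above) =====
theorem path_by_user_id_spec : Claim_equal_path_by_user_id := by
  intro user_id _
  unfold Spec_path_by_user_id
  by_cases h : user_id + 100000000 ≤ 0
  · simp only [path_by_user_id, path_by_user_id_alt, if_pos h]
    rw [pathLoopA, if_neg (by omega : ¬ 0 < user_id + 100000000)]
    rfl
  · simp only [path_by_user_id, path_by_user_id_alt, if_neg h]
    set n : Int := user_id + 100000000 with hn
    have hpos : 0 < n := by omega
    have hcast : ((n.toNat : Nat) : Int) = n := Int.toNat_of_nonneg (by omega)
    have hloop : pathLoopA n [] 1 = gspec n.toNat 1 := by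
      have h2 := pathLoopA_eq_gspec n.toNat [] 1
      rw [hcast] at h2
      rw [h2, List.nil_append]
    rw [hloop, gspec_reverse_eq_Tmark n.toNat (by omega) 1 (by omega), toList_toStr_pos n hpos,
      List.foldl_cons, List.foldl_cons, List.foldl_nil,
      insertSlashAt_eq_insAtP, insertSlashAt_eq_insAtP]
    simp only [Tmark, if_pos (by omega : (1:Int) ≤ 3), if_pos (by omega : (1:Int) ≤ 6)]
    have e1 : ((Nat.toDigits 10 n.toNat).length : Int) - 4 + 1
        = ((Nat.toDigits 10 n.toNat).length : Int) - 3 := by ring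
    have e2 : ((Nat.toDigits 10 n.toNat).length : Int) - 7 + 1
        = ((Nat.toDigits 10 n.toNat).length : Int) - 6 := by ring
    rw [e1, e2]
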